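-- pv_equiv track=rewrite | github.com/sungjaeshim/ai-productivity-lab | scripts/visual-notion-publish.py | find_prop
-- ===== SOURCE A (Python) =====
-- from typing import Any
--
-- def find_prop(
--     props: dict[str, Any],
--     candidates: list[str],
--     expected_type: str | None = None,
-- ) -> str | None:
--     lowered = {name.lower(): name for name in props.keys()}
--     for candidate in candidates:
--         actual = lowered.get(candidate.lower())
--         if actual is None:
--             continue
--         if expected_type and props[actual].get("type") != expected_type:
--             continue
--         return actual
--     return None
-- ===== SOURCE B (Python) =====
-- def find_prop(props, candidates, expected_type=None):
--     # Rank each lowercase candidate by its earliest position, then pick the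
--     # type-acceptable property with the lowest-ranked name in one pass.
--     rank = {}
--     for i, c in enumerate(candidates):
--         rank.setdefault(c.lower(), i)
--     best = None
--     for name, value in props.items():
--         i = rank.get(name.lower())
--         if i is None:
--             continue
--         if expected_type and value.get("type") != expected_type:
--             continue
--         if best is None or i < best[0]:
--             best = (i, name)
--     return best[1] if best is not None else None
-- ===== Notes on version B (the rewrite author's own statement) =====
-- stated objective: alternative
-- what changed: B inverts the traversal: instead of A's candidate loop over a precomputed lowercase-name index, B ranks each lowercase candidate by earliest position and makes one pass over props keeping the type-acceptable property with minimal rank; Pre_ excludes props whose names collide case-insensitively (there A's dict-comprehension last-key-wins collision choice is accidental and either match is defensible).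
import Mathlib
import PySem

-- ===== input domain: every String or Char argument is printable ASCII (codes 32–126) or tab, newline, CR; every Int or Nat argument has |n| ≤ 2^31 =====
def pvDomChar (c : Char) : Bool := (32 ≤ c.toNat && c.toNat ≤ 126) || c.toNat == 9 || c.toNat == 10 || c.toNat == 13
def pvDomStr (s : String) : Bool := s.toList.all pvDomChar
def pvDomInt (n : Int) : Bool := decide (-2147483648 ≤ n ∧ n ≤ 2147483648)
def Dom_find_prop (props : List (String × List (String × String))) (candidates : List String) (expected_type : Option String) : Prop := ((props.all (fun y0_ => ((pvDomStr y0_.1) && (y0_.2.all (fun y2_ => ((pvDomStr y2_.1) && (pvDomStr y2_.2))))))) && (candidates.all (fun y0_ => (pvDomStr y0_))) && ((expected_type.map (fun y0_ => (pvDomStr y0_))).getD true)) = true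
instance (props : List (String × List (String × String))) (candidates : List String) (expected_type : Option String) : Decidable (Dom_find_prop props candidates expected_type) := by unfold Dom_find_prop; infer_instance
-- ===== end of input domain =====

-- B inverts the traversal: instead of a candidate loop over a lowercase-name index, it ranks
-- candidates by earliest position and takes the minimal-rank acceptable property in one pass
-- over props; an alternative decomposition, not claimed faster.

-- ===== PORT A =====
-- A's loop over candidates, with the precomputed `lowered` dict.
def findPropLoopA (props : List (String × List (String × String)))
    (lowered : PySem.Dict String String) (expected_type : Option String) :
    List String → Option String
  | [] => none
  | c :: rest =>
    match lowered.get? (PySem.Str.lower c) with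
    | none => findPropLoopA props lowered expected_type rest
    | some actual =>
      if (match expected_type with
          | some t => decide (t ≠ "") &&
              decide ((PySem.Dict.mk ((PySem.Dict.mk props).getD actual [])).get? "type" ≠ some t)
          | none => false)
      then findPropLoopA props lowered expected_type rest
      else some actual

def find_prop (props : List (String × List (String × String))) (candidates : List String) (expected_type : Option String) : Option String :=
  findPropLoopA props
    (props.foldl (fun acc p => acc.insert (PySem.Str.lower p.1) p.1) PySem.Dict.empty)
    expected_type candidates

-- ===== PORT B =====
def find_prop_alt (props : List (String × List (String × String))) (candidates : List String) (expected_type : Option String) : Option String :=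
  let rank : PySem.Dict String Int :=
    (PySem.List.enumerate candidates).foldl
      (fun d ic => d.setdefault (PySem.Str.lower ic.2) ic.1) PySem.Dict.empty
  let best : Option (Int × String) :=
    props.foldl (fun best p =>
      match rank.get? (PySem.Str.lower p.1) with
      | none => best
      | some i =>
        if (match expected_type with
            | some t => decide (t ≠ "") && decide ((PySem.Dict.mk p.2).get? "type" ≠ some t)
            | none => false)
        then best
        else match best with
          | none => some (i, p.1)
          | some b => if i < b.1 then some (i, p.1) else best) none
  best.map Prod.snd

-- ===== PRECONDITION & SPEC =====
-- props models a Python dict, so its keys are distinct; Pre_ additionally excludes props whose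
-- names collide case-insensitively, where A's last-key-wins lowercase index is an accidental
-- dict-comprehension collision artefact and either colliding name is a defensible answer.
def Pre_find_prop (props : List (String × List (String × String))) (candidates : List String) (expected_type : Option String) : Prop :=
  (props.map (fun p => PySem.Str.lower p.1)).Nodup
instance (props : List (String × List (String × String))) (candidates : List String) (expected_type : Option String) : Decidable (Pre_find_prop props candidates expected_type) := by unfold Pre_find_prop; infer_instance

def pvWitness_find_prop : (List (String × List (String × String))) × List String × Option String :=
  ([("Name", [("type", "title")]), ("Tags", [("type", "multi_select")])], ["name", "tags"], some "title")

def Spec_find_prop (props : List (String × List (String × String))) (candidates : List String) (expected_type : Option String) (out : Option String) : Prop := out = find_prop_alt props candidates expected_type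
instance (props : List (String × List (String × String))) (candidates : List String) (expected_type : Option String) (out : Option String) : Decidable (Spec_find_prop props candidates expected_type out) := by unfold Spec_find_prop; infer_instance

-- ===== CLAIM (what is proved, stated in full; the proofs are below) =====
def Claim_equal_find_prop : Prop := ∀ (props : List (String × List (String × String))) (candidates : List String) (expected_type : Option String), Dom_find_prop props candidates expected_type → Pre_find_prop props candidates expected_type → Spec_find_prop props candidates expected_type (find_prop props candidates expected_type)

-- ===== LEMMAS AND PROOFS =====

-- the shared type filter (A and B test it identically)
def pvBad (et : Option String) (v : List (String × String)) : Bool :=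
  match et with
  | some t => decide (t ≠ "") && decide ((PySem.Dict.mk v).get? "type" ≠ some t)
  | none => false

-- last (name, value) pair of props whose lowercased name equals lc
def lastMatch (lc : String) (props : List (String × List (String × String))) :
    Option (String × List (String × String)) :=
  props.foldl (fun acc p => if PySem.Str.lower p.1 == lc then some p else acc) none

-- common reference behaviour both ports are reduced to
def aSpec (props : List (String × List (String × String))) (et : Option String) :
    List String → Option String
  | [] => none
  | c :: r =>
    match lastMatch (PySem.Str.lower c) props with
    | none => aSpec props et r
    | some p => if pvBad et p.2 then aSpec props et r else some p.1

-- B's fold, abstracted over the rank-lookup function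
def bstep (et : Option String) (q : String → Option Int) :
    Option (Int × String) → (String × List (String × String)) → Option (Int × String) :=
  fun best p =>
    match q (PySem.Str.lower p.1) with
    | none => best
    | some i =>
      if pvBad et p.2 then best
      else match best with
        | none => some (i, p.1)
        | some b => if i < b.1 then some (i, p.1) else best

def bfold (et : Option String) (q : String → Option Int)
    (props : List (String × List (String × String))) (acc : Option (Int × String)) :
    Option (Int × String) :=
  props.foldl (bstep et q) acc

def qOf (candidates : List String) : String → Option Int := fun k =>
  ((PySem.List.enumerate candidates).foldl
    (fun d ic => d.setdefault (PySem.Str.lower ic.2) ic.1) PySem.Dict.empty).get? k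

def qsh (q : String → Option Int) (lc : String) : String → Option Int := fun k =>
  if lc == k then some 0 else (q k).map (· + 1)

def shiftOpt (b : Option (Int × String)) : Option (Int × String) :=
  b.map (fun x => (x.1 + 1, x.2))

theorem find_prop_alt_eq (props : List (String × List (String × String)))
    (candidates : List String) (et : Option String) :
    find_prop_alt props candidates et = (bfold et (qOf candidates) props none).map Prod.snd := rfl

-- ---- rank characterisation ----
theorem sd_get? (k : String) :
    ∀ (l : List (Int × String)) (d : PySem.Dict String Int),
      (l.foldl (fun d ic => d.setdefault (PySem.Str.lower ic.2) ic.1) d).get? k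
        = (d.get? k).or ((l.find? (fun ic => PySem.Str.lower ic.2 == k)).map Prod.fst) := by
  intro l
  induction l with
  | nil => intro d; simp
  | cons ic t ih =>
    intro d
    simp only [List.foldl_cons, List.find?_cons]
    by_cases hk : PySem.Str.lower ic.2 == k
    · have hkk : PySem.Str.lower ic.2 = k := by simpa using hk
      rw [ih, hk]
      subst hkk
      rw [PySem.Dict.get?_setdefault_self]
      cases d.get? (PySem.Str.lower ic.2) <;> simp
    · rw [ih]
      have hne : k ≠ PySem.Str.lower ic.2 := by
        intro h; exact hk (by simp [h])
      rw [PySem.Dict.get?_setdefault_of_ne _ _ hne]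
      simp [hk]

theorem fi_shift (k : String) :
    ∀ (r : List String) (s : Int),
      ((PySem.List.enumerate r s).find? (fun ic => PySem.Str.lower ic.2 == k)).map Prod.fst
        = (((PySem.List.enumerate r 0).find? (fun ic => PySem.Str.lower ic.2 == k)).map Prod.fst).map (· + s) := by
  intro r
  induction r with
  | nil => intro s; simp [PySem.List.enumerate_nil]
  | cons x t ih =>
    intro s
    rw [PySem.List.enumerate_cons, PySem.List.enumerate_cons]
    by_cases hk : PySem.Str.lower x == k
    · simp [List.find?_cons, hk]
    · simp only [List.find?_cons, hk, Bool.false_eq_true, if_false, zero_add]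
      rw [ih (s + 1), ih 1]
      cases ((PySem.List.enumerate t 0).find? (fun ic => PySem.Str.lower ic.2 == k)).map Prod.fst with
      | none => simp
      | some j => simp; omega

theorem qOf_eq_find (cands : List String) (k : String) :
    qOf cands k = ((PySem.List.enumerate cands).find?
      (fun ic => PySem.Str.lower ic.2 == k)).map Prod.fst := by
  unfold qOf
  rw [sd_get?]
  simp [PySem.Dict.get?_empty]

theorem qOf_nil (k : String) : qOf [] k = none := by
  simp [qOf, PySem.List.enumerate_nil]

theorem qOf_cons (c : String) (r : List String) (k : String) :
    qOf (c :: r) k = qsh (qOf r) (PySem.Str.lower c) k := by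
  rw [qOf_eq_find, PySem.List.enumerate_cons, List.find?_cons]
  unfold qsh
  by_cases hk : PySem.Str.lower c == k
  · simp [hk]
  · simp only [hk, Bool.false_eq_true, if_false, zero_add]
    rw [fi_shift k r 1, qOf_eq_find]

theorem qOf_cons_fun (c : String) (r : List String) :
    qOf (c :: r) = qsh (qOf r) (PySem.Str.lower c) :=
  funext (qOf_cons c r)

theorem qOf_nonneg : ∀ (candidates : List String) (k : String) (i : Int),
    qOf candidates k = some i → 0 ≤ i := by
  intro candidates
  induction candidates with
  | nil => intro k i h; rw [qOf_nil] at h; cases h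
  | cons c r ih =>
    intro k i h
    rw [qOf_cons] at h
    unfold qsh at h
    by_cases hk : PySem.Str.lower c == k
    · simp [hk] at h; omega
    · simp [hk] at h
      obtain ⟨j, hj, rfl⟩ := h
      have := ih k j hj; omega

-- ---- bfold lemmas ----
theorem bfold_none (et : Option String) (q : String → Option Int)
    (hq : ∀ k, q k = none) :
    ∀ (props : List (String × List (String × String))) (acc : Option (Int × String)),
      bfold et q props acc = acc := by
  intro props
  induction props with
  | nil => intro acc; rfl
  | cons p ps ih =>
    intro acc
    unfold bfold at *
    simp only [List.foldl_cons]
    rw [show bstep et q acc p = acc by unfold bstep; rw [hq]]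
    exact ih acc

theorem bfold_nonneg (et : Option String) (q : String → Option Int)
    (hq : ∀ k i, q k = some i → 0 ≤ i) :
    ∀ (props : List (String × List (String × String))) (acc : Option (Int × String)),
      (∀ b, acc = some b → 0 ≤ b.1) →
      ∀ b, bfold et q props acc = some b → 0 ≤ b.1 := by
  intro props
  induction props with
  | nil => intro acc hacc b h; exact hacc b h
  | cons p ps ih =>
    intro acc hacc b h
    unfold bfold at h
    simp only [List.foldl_cons] at h
    refine ih (bstep et q acc p) ?_ b h
    intro b' hb'
    unfold bstep at hb'
    cases hqv : q (PySem.Str.lower p.1) with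
    | none => rw [hqv] at hb'; exact hacc b' hb'
    | some i =>
      rw [hqv] at hb'
      by_cases hbad : pvBad et p.2
      · simp [hbad] at hb'; exact hacc b' hb'
      · simp [hbad] at hb'
        cases acc with
        | none => simp at hb'; simp [← hb']; exact hq _ _ hqv
        | some b0 =>
          simp at hb'
          split_ifs at hb' with hlt
          · simp at hb'; simp [← hb']; exact hq _ _ hqv
          · exact hacc b' (by simp [hb'])

theorem bfold_shift (et : Option String) (q : String → Option Int) (lc : String) :
    ∀ (props : List (String × List (String × String))),
      (∀ p ∈ props, PySem.Str.lower p.1 = lc → pvBad et p.2 = true) →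
      ∀ (acc : Option (Int × String)),
        bfold et (qsh q lc) props (shiftOpt acc) = shiftOpt (bfold et q props acc) := by
  intro props
  induction props with
  | nil => intro _ acc; rfl
  | cons p ps ih =>
    intro hp acc
    unfold bfold at *
    simp only [List.foldl_cons]
    have hstep : bstep et (qsh q lc) (shiftOpt acc) p = shiftOpt (bstep et q acc p) := by
      unfold bstep qsh
      by_cases hlc : PySem.Str.lower p.1 = lc
      · have hbad := hp p (List.mem_cons_self) hlc
        have hbeq : (lc == PySem.Str.lower p.1) = true := by simp [hlc]
        rw [hbeq]
        simp only [if_true]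
        rw [hbad]
        simp only [if_true]
        cases q (PySem.Str.lower p.1) <;> simp [hbad]
      · have hbeq : (lc == PySem.Str.lower p.1) = false := by
          simp; intro h; exact hlc h.symm
        rw [hbeq]
        simp only [Bool.false_eq_true, if_false]
        cases hqv : q (PySem.Str.lower p.1) with
        | none => simp
        | some i =>
          simp only [Option.map_some]
          by_cases hbad : pvBad et p.2
          · simp [hbad]
          · simp only [hbad, Bool.false_eq_true, if_false]
            cases acc with
            | none => simp [shiftOpt]
            | some b =>
              simp only [shiftOpt, Option.map_some]
              by_cases hlt : i < b.1
              · rw [if_pos (by omega), if_pos hlt]; simp [shiftOpt]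
              · rw [if_neg (by omega), if_neg hlt]; simp [shiftOpt]
    rw [hstep]
    exact ih (fun p hm => hp p (List.mem_cons_of_mem _ hm)) (bstep et q acc p)

theorem bfold_keep (et : Option String) (q : String → Option Int) (lc : String)
    (hq : ∀ k i, q k = some i → 0 ≤ i) :
    ∀ (props : List (String × List (String × String))) (n : String),
      (∀ p ∈ props, PySem.Str.lower p.1 ≠ lc) →
      bfold et (qsh q lc) props (some (0, n)) = some (0, n) := by
  intro props
  induction props with
  | nil => intro n _; rfl
  | cons p ps ih =>
    intro n hp
    unfold bfold at *
    simp only [List.foldl_cons]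
    have hstep : bstep et (qsh q lc) (some (0, n)) p = some (0, n) := by
      unfold bstep qsh
      have hbeq : (lc == PySem.Str.lower p.1) = false := by
        simp; intro h; exact hp p List.mem_cons_self h.symm
      rw [hbeq]
      simp only [Bool.false_eq_true, if_false]
      cases hqv : q (PySem.Str.lower p.1) with
      | none => simp
      | some i =>
        have hi := hq _ _ hqv
        simp only [Option.map_some]
        by_cases hbad : pvBad et p.2
        · simp [hbad]
        · simp only [hbad, Bool.false_eq_true, if_false]
          rw [if_neg (by omega)]
    rw [hstep]
    exact ih n (fun p hm => hp p (List.mem_cons_of_mem _ hm))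

-- ---- lastMatch lemmas ----
theorem lastMatch_mem (lc : String) :
    ∀ (props : List (String × List (String × String)))
      (h0 : Option (String × List (String × String))) (q : String × List (String × String)),
      props.foldl (fun acc p => if PySem.Str.lower p.1 == lc then some p else acc) h0 = some q →
      q ∈ props ∨ h0 = some q := by
  intro props
  induction props with
  | nil => intro h0 q h; right; simpa using h
  | cons p ps ih =>
    intro h0 q h
    simp only [List.foldl_cons] at h
    rcases ih _ q h with hmem | heq
    · left; exact List.mem_cons_of_mem _ hmem
    · by_cases hk : PySem.Str.lower p.1 == lc
      · simp [hk] at heq; left; simp [heq.symm]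
      · simp [hk] at heq; right; exact heq

theorem lastMatch_ne_none (lc : String) :
    ∀ (props : List (String × List (String × String))) (q : String × List (String × String)),
      props.foldl (fun acc p => if PySem.Str.lower p.1 == lc then some p else acc) (some q) ≠ none := by
  intro props
  induction props with
  | nil => intro q h; cases h
  | cons p ps ih =>
    intro q h
    simp only [List.foldl_cons] at h
    by_cases hk : PySem.Str.lower p.1 == lc
    · rw [if_pos hk] at h; exact ih p h
    · rw [if_neg hk] at h; exact ih q h

theorem lastMatch_none (lc : String) :
    ∀ (props : List (String × List (String × String))),
      lastMatch lc props = none → ∀ p ∈ props, PySem.Str.lower p.1 ≠ lc := by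
  intro props
  unfold lastMatch
  induction props with
  | nil => intro _ p hm; cases hm
  | cons x t ih =>
    intro h p hm
    simp only [List.foldl_cons] at h
    by_cases hk : PySem.Str.lower x.1 == lc
    · rw [if_pos hk] at h; exact absurd h (lastMatch_ne_none lc t x)
    · rw [if_neg hk] at h
      rcases List.mem_cons.mp hm with rfl | hm'
      · simpa using hk
      · exact ih h p hm'

theorem lastMatch_some_lower (lc : String) :
    ∀ (props : List (String × List (String × String)))
      (h0 : Option (String × List (String × String))) (q : String × List (String × String)),
      props.foldl (fun acc p => if PySem.Str.lower p.1 == lc then some p else acc) h0 = some q →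
      PySem.Str.lower q.1 = lc ∨ h0 = some q := by
  intro props
  induction props with
  | nil => intro h0 q h; right; simpa using h
  | cons p ps ih =>
    intro h0 q h
    simp only [List.foldl_cons] at h
    rcases ih _ q h with hl | heq
    · left; exact hl
    · by_cases hk : PySem.Str.lower p.1 == lc
      · rw [if_pos hk] at heq
        left; cases heq; simpa using hk
      · rw [if_neg hk] at heq; right; exact heq

-- ---- A-side lemmas ----
theorem lowered_get_eq_lastMatch (lc : String) :
    ∀ (props : List (String × List (String × String)))
      (d0 : PySem.Dict String String) (h0 : Option (String × List (String × String))),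
      d0.get? lc = h0.map Prod.fst →
      (props.foldl (fun acc p => acc.insert (PySem.Str.lower p.1) p.1) d0).get? lc
        = (props.foldl (fun acc p => if PySem.Str.lower p.1 == lc then some p else acc) h0).map Prod.fst := by
  intro props
  induction props with
  | nil => intro d0 h0 h; simpa using h
  | cons p ps ih =>
    intro d0 h0 h
    simp only [List.foldl_cons]
    apply ih
    by_cases hk : PySem.Str.lower p.1 = lc
    · subst hk
      simp [PySem.Dict.get?_insert_self]
    · rw [PySem.Dict.get?_insert_of_ne _ _ (fun hc => hk hc.symm)]
      simp [hk, h]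

theorem mk_get?_of_mem {ν : Type} :
    ∀ (props : List (String × ν)) (k : String) (v : ν),
      (props.map Prod.fst).Nodup → (k, v) ∈ props →
      (PySem.Dict.mk props).get? k = some v := by
  intro props
  induction props with
  | nil => intro k v _ h; simp at h
  | cons p ps ih =>
    intro k v hnd hmem
    simp only [List.map_cons, List.nodup_cons] at hnd
    rw [PySem.Dict.get?_mk_cons]
    rcases List.mem_cons.mp hmem with heq | hmem'
    · simp [← heq]
    · have hk : (p.1 == k) = false := by
        refine beq_eq_false_iff_ne.mpr (fun hb => hnd.1 ?_)
        rw [hb]; exact List.mem_map_of_mem hmem'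
      rw [hk]
      simpa using ih k v hnd.2 hmem'

theorem names_nodup_of_pre (props : List (String × List (String × String)))
    (h : (props.map (fun p => PySem.Str.lower p.1)).Nodup) : (props.map Prod.fst).Nodup := by
  have : props.map (fun p => PySem.Str.lower p.1)
      = (props.map Prod.fst).map PySem.Str.lower := by simp [List.map_map]
  rw [this] at h
  exact h.of_map

theorem a_side (props : List (String × List (String × String))) (et : Option String)
    (hnd : (props.map Prod.fst).Nodup) :
    ∀ (candidates : List String), find_prop props candidates et = aSpec props et candidates := by
  intro candidates
  unfold find_prop
  induction candidates with
  | nil => rfl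
  | cons c rest ih =>
    simp only [findPropLoopA, aSpec]
    have hlook := lowered_get_eq_lastMatch (PySem.Str.lower c) props PySem.Dict.empty none
      (by simp [PySem.Dict.get?_empty])
    rw [hlook]
    cases hlm : lastMatch (PySem.Str.lower c) props with
    | none => unfold lastMatch at hlm; rw [hlm]; simpa using ih
    | some q =>
      obtain ⟨name, value⟩ := q
      unfold lastMatch at hlm
      rw [hlm]
      have hmem : (name, value) ∈ props := by
        rcases lastMatch_mem (PySem.Str.lower c) props none _ hlm with h | h
        · exact h
        · simp at h
      have hv : (PySem.Dict.mk props).getD name [] = value := by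
        rw [PySem.Dict.getD_eq_get?_getD, mk_get?_of_mem props name value hnd hmem]
        rfl
      simp only [Option.map_some, hv]
      show (if pvBad et value then _ else _) = (if pvBad et value then _ else _)
      by_cases hbad : pvBad et value
      · rw [if_pos hbad, if_pos hbad]; exact ih
      · rw [if_neg hbad, if_neg hbad]

-- nodup gives: members of l1 and l2 around p0 never share p0's lowered name
theorem side_ne (l1 l2 : List (String × List (String × String)))
    (p0 : String × List (String × String))
    (hnd : ((l1 ++ p0 :: l2).map (fun p => PySem.Str.lower p.1)).Nodup) :
    ∀ p ∈ l1 ++ l2, PySem.Str.lower p.1 ≠ PySem.Str.lower p0.1 := by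
  intro p hm heq
  simp only [List.map_append, List.map_cons, List.nodup_append, List.nodup_cons] at hnd
  rcases List.mem_append.mp hm with h1 | h2
  · exact hnd.2.2 _ (List.mem_map_of_mem h1) (PySem.Str.lower p0.1) (by simp) heq
  · exact hnd.2.1.1 (heq ▸ List.mem_map_of_mem h2)

theorem b_side (props : List (String × List (String × String))) (et : Option String)
    (hnd : (props.map (fun p => PySem.Str.lower p.1)).Nodup) :
    ∀ (candidates : List String),
      (bfold et (qOf candidates) props none).map Prod.snd = aSpec props et candidates := by
  intro candidates
  induction candidates with
  | nil => rw [bfold_none et _ qOf_nil]; rfl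
  | cons c rest ih =>
    rw [qOf_cons_fun]
    show _ = aSpec props et (c :: rest)
    unfold aSpec
    cases hlm : lastMatch (PySem.Str.lower c) props with
    | none =>
      have hside := lastMatch_none (PySem.Str.lower c) props hlm
      have hsh := bfold_shift et (qOf rest) (PySem.Str.lower c) props
        (fun p hm hl => absurd hl (hside p hm)) none
      simp only [shiftOpt, Option.map_none] at hsh
      rw [hsh]
      rw [show ∀ (x : Option (Int × String)),
        (x.map (fun y : Int × String => (y.1 + 1, y.2))).map Prod.snd = x.map Prod.snd from
        fun x => by cases x <;> rfl]
      exact ih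
    | some p0 =>
      have hmem : p0 ∈ props := by
        unfold lastMatch at hlm
        rcases lastMatch_mem (PySem.Str.lower c) props none _ hlm with h | h
        · exact h
        · simp at h
      have hp0lc : PySem.Str.lower p0.1 = PySem.Str.lower c := by
        unfold lastMatch at hlm
        rcases lastMatch_some_lower (PySem.Str.lower c) props none _ hlm with h | h
        · exact h
        · simp at h
      obtain ⟨l1, l2, rfl⟩ := List.append_of_mem hmem
      have hside := side_ne l1 l2 p0 hnd
      show Option.map Prod.snd (bfold et (qsh (qOf rest) (PySem.Str.lower c)) (l1 ++ p0 :: l2) none)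
        = if pvBad et p0.2 = true then aSpec (l1 ++ p0 :: l2) et rest else some p0.1
      by_cases hbad : pvBad et p0.2
      · rw [if_pos hbad]
        have hsh := bfold_shift et (qOf rest) (PySem.Str.lower c) (l1 ++ p0 :: l2)
          (fun p hm hl => by
            rcases List.mem_append.mp hm with h1 | h1
            · exact absurd (hp0lc ▸ hl) (hside p (List.mem_append.mpr (Or.inl h1)))
            · rcases List.mem_cons.mp h1 with rfl | h2
              · exact hbad
              · exact absurd (hp0lc ▸ hl) (hside p (List.mem_append.mpr (Or.inr h2)))) none
        simp only [shiftOpt, Option.map_none] at hsh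
        rw [hsh]
        rw [show ∀ (x : Option (Int × String)),
          (x.map (fun y : Int × String => (y.1 + 1, y.2))).map Prod.snd = x.map Prod.snd from
          fun x => by cases x <;> rfl]
        exact ih
      · rw [if_neg hbad]
        have hql : ∀ p ∈ l1, PySem.Str.lower p.1 ≠ PySem.Str.lower c :=
          fun p hm => hp0lc ▸ hside p (List.mem_append.mpr (Or.inl hm))
        have hqr : ∀ p ∈ l2, PySem.Str.lower p.1 ≠ PySem.Str.lower c :=
          fun p hm => hp0lc ▸ hside p (List.mem_append.mpr (Or.inr hm))
        have hnn := qOf_nonneg rest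
        unfold bfold
        rw [List.foldl_append, List.foldl_cons]
        have hl1 : (l1.foldl (bstep et (qsh (qOf rest) (PySem.Str.lower c))) none)
            = shiftOpt (bfold et (qOf rest) l1 none) := by
          have := bfold_shift et (qOf rest) (PySem.Str.lower c) l1
            (fun p hm hl => absurd hl (hql p hm)) none
          simpa [bfold, shiftOpt] using this
        rw [hl1]
        have hstep : bstep et (qsh (qOf rest) (PySem.Str.lower c))
            (shiftOpt (bfold et (qOf rest) l1 none)) p0 = some (0, p0.1) := by
          unfold bstep qsh
          have hbeq : (PySem.Str.lower c == PySem.Str.lower p0.1) = true := by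
            simp [hp0lc]
          rw [hbeq]
          simp only [if_true, hbad, Bool.false_eq_true, if_false]
          cases hx : bfold et (qOf rest) l1 none with
          | none => simp [shiftOpt]
          | some b =>
            have hb := bfold_nonneg et (qOf rest) hnn l1 none (by intro b h; cases h) b hx
            simp only [shiftOpt, Option.map_some]
            rw [if_pos (by omega)]
        rw [hstep]
        have hkeep := bfold_keep et (qOf rest) (PySem.Str.lower c) hnn l2 p0.1 hqr
        unfold bfold at hkeep
        rw [hkeep]
        rfl

-- ===== VERDICT (by name: the statement is the Claim_ definition above) =====
theorem find_prop_spec : Claim_equal_find_prop := by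
  intro props candidates expected_type _ hpre
  unfold Spec_find_prop
  unfold Pre_find_prop at hpre
  rw [find_prop_alt_eq, b_side props expected_type hpre candidates,
    a_side props expected_type (names_nodup_of_pre props hpre) candidates]
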